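-- pv_equiv track=rewrite | github.com/lara20000113/usenix2026 | PCFG.py | LDSParse
-- ===== SOURCE A (Python) =====
-- def LDSParse(string):  # 只分析LDS结构
--     tmpIndex = 0
--     dList = []
--     lList = []
--     sList = []
--     dString = ""
--     lString = ""
--     sString = ""
--     template = []
--     while string[tmpIndex] != '\n':
--         if string[tmpIndex].isdigit():
--             while string[tmpIndex].isdigit():
--                 dString += string[tmpIndex]
--                 tmpIndex += 1
--             dList.append(dString)
--             template.append('D.' + str(len(dString)))
--             dString = ""
--         elif string[tmpIndex].islower() or string[tmpIndex].isupper():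
--             while string[tmpIndex].islower() or string[tmpIndex].isupper():
--                 lString += string[tmpIndex]
--                 tmpIndex += 1
--             lList.append(lString)
--             template.append('L.' + str(len(lString)))
--             lString = ""
--         else:
--             while not (string[tmpIndex].isupper() or string[tmpIndex].islower() or string[tmpIndex].isdigit() or
--                        string[tmpIndex] == '\n'):
--                 sString += string[tmpIndex]
--                 tmpIndex += 1
--             sList.append(sString)
--             template.append('S.' + str(len(sString)))
--             sString = ""
--     return dList, lList, sList, template
-- ===== SOURCE B (Python) =====
-- def LDSParse(string):  # two-pass: scan to the newline, group the prefix by character class, then distribute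
--     end = 0
--     while string[end] != '\n':
--         end += 1
--
--     def cat(c):
--         if c.isdigit():
--             return 'D'
--         if c.islower() or c.isupper():
--             return 'L'
--         return 'S'
--
--     runs = []
--     for c in string[:end]:
--         k = cat(c)
--         if runs and runs[-1][0] == k:
--             runs[-1] = (k, runs[-1][1] + c)
--         else:
--             runs.append((k, c))
--
--     dList, lList, sList, template = [], [], [], []
--     for k, run in runs:
--         if k == 'D':
--             dList.append(run)
--         elif k == 'L':
--             lList.append(run)
--         else:
--             sList.append(run)
--         template.append(k + '.' + str(len(run)))
--     return dList, lList, sList, template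
-- ===== Notes on version B (the rewrite author's own statement) =====
-- stated objective: idiomatic
-- what changed: A's single nested-while state machine (three duplicated inner loops mutating a shared index and per-class string buffers) is replaced by a two-pass decomposition: a flat scan finds the newline, the prefix is grouped into (class, run) pairs by one generic fold, and a second loop distributes the runs into the four output lists.
import Mathlib
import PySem

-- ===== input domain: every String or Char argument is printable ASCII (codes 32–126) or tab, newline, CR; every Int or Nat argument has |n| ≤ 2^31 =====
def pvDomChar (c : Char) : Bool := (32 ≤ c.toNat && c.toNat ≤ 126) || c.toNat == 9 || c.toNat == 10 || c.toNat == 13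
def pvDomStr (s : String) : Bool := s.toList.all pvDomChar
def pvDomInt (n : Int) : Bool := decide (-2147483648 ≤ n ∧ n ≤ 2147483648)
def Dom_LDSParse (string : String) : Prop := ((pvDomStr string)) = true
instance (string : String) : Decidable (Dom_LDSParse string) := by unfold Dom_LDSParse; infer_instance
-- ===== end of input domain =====

-- B replaces A's nested-while state machine by a two-pass decomposition (scan to the newline,
-- group the prefix into class runs with one generic fold, then distribute the runs); same cost.

-- ===== PORT A =====
-- inner 'while <class-predicate>(string[tmpIndex]): buf += string[tmpIndex]; tmpIndex += 1'
-- (if the index runs off the end Python raises IndexError; Pre_ excludes that, the port just stops)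
def pyRunWhile (p : Char → Bool) (cs : List Char) (i : Nat) (acc : List Char) : List Char × Nat :=
  if h : i < cs.length then
    if p cs[i] then pyRunWhile p cs (i + 1) (acc ++ [cs[i]])
    else (acc, i)
  else (acc, i)
termination_by cs.length - i

lemma pyRunWhile_spec (p : Char → Bool) (cs : List Char) (i : Nat) (acc : List Char) :
    pyRunWhile p cs i acc =
      (acc ++ (cs.drop i).takeWhile p, i + ((cs.drop i).takeWhile p).length) := by
  fun_induction pyRunWhile p cs i acc with
  | case1 i acc h hp ih =>
      rw [List.drop_eq_getElem_cons h, List.takeWhile_cons, if_pos hp, ih]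
      simp [List.append_assoc]
      omega
  | case2 i acc h hp =>
      rw [List.drop_eq_getElem_cons h, List.takeWhile_cons, if_neg (by simp [hp])]
      simp
  | case3 i acc h =>
      have : cs.drop i = [] := List.drop_eq_nil_of_le (by omega)
      simp [this]

lemma takeWhile_drop_pos (p : Char → Bool) (cs : List Char) (i : Nat)
    (h : i < cs.length) (hp : p cs[i] = true) :
    0 < ((cs.drop i).takeWhile p).length := by
  rw [List.drop_eq_getElem_cons h, List.takeWhile_cons, if_pos hp]
  simp

-- outer 'while string[tmpIndex] != '\n':' with the three elif branches
def LDSParseLoop (cs : List Char) (i : Nat)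
    (d l s t : List String) : List String × List String × List String × List String :=
  if h : i < cs.length then
    if hnl : cs[i] == '\n' then (d, l, s, t)
    else if hd : PySem.Chars.isdigit cs[i] then
      let r := pyRunWhile (fun x => PySem.Chars.isdigit x) cs i []
      LDSParseLoop cs r.2 (d ++ [String.ofList r.1]) l s
        (t ++ [String.ofList ('D' :: '.' :: PySem.Int.toChars (r.1.length : Int))])
    else if hl : PySem.Chars.islower cs[i] || PySem.Chars.isupper cs[i] then
      let r := pyRunWhile (fun x => PySem.Chars.islower x || PySem.Chars.isupper x) cs i []
      LDSParseLoop cs r.2 d (l ++ [String.ofList r.1]) s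
        (t ++ [String.ofList ('L' :: '.' :: PySem.Int.toChars (r.1.length : Int))])
    else
      let r := pyRunWhile
        (fun x => !(PySem.Chars.isupper x || PySem.Chars.islower x || PySem.Chars.isdigit x || x == '\n'))
        cs i []
      LDSParseLoop cs r.2 d l (s ++ [String.ofList r.1])
        (t ++ [String.ofList ('S' :: '.' :: PySem.Int.toChars (r.1.length : Int))])
  else (d, l, s, t)
termination_by cs.length - i
decreasing_by
  · rw [pyRunWhile_spec]
    have hlt : i < cs.length := by assumption
    have := takeWhile_drop_pos (fun x => PySem.Chars.isdigit x) cs i hlt hd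
    omega
  · rw [pyRunWhile_spec]
    have hlt : i < cs.length := by assumption
    have := takeWhile_drop_pos (fun x => PySem.Chars.islower x || PySem.Chars.isupper x) cs i hlt hl
    omega
  · rw [pyRunWhile_spec]
    have hlt : i < cs.length := by assumption
    have := takeWhile_drop_pos
      (fun x => !(PySem.Chars.isupper x || PySem.Chars.islower x || PySem.Chars.isdigit x || x == '\n')) cs i
      hlt (by simp_all)
    omega

def LDSParse (string : String) : List String × List String × List String × List String :=
  LDSParseLoop string.toList 0 [] [] [] []

-- ===== PORT B =====
-- 'end = 0; while string[end] != '\n': end += 1'  (past the end Python raises IndexError; Pre_ excludes that)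
def findNl (cs : List Char) (i : Nat) : Nat :=
  if h : i < cs.length then
    if cs[i] == '\n' then i else findNl cs (i + 1)
  else i
termination_by cs.length - i

-- 'cat(c)'
def catB (c : Char) : Char :=
  if PySem.Chars.isdigit c then 'D'
  else if PySem.Chars.islower c || PySem.Chars.isupper c then 'L'
  else 'S'

-- body of 'for c in string[:end]': extend the last run or start a new one (runs kept newest-first)
def runStep (acc : List (Char × List Char)) (c : Char) : List (Char × List Char) :=
  let k := catB c
  match acc with
  | (k', r) :: rest => if k' == k then (k', r ++ [c]) :: rest else (k, [c]) :: (k', r) :: rest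
  | [] => [(k, [c])]

-- body of 'for k, run in runs'
def distStep (acc : List String × List String × List String × List String)
    (g : Char × List Char) : List String × List String × List String × List String :=
  match acc, g with
  | (d, l, s, t), (k, run) =>
    let entry := String.ofList (k :: '.' :: PySem.Int.toChars (run.length : Int))
    if k == 'D' then (d ++ [String.ofList run], l, s, t ++ [entry])
    else if k == 'L' then (d, l ++ [String.ofList run], s, t ++ [entry])
    else (d, l, s ++ [String.ofList run], t ++ [entry])

def LDSParse_alt (string : String) : List String × List String × List String × List String :=
  let cs := string.toList
  let endIdx := findNl cs 0
  let pfx := PySem.List.slice cs none (some (endIdx : Int))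
  let runs := (pfx.foldl runStep []).reverse
  runs.foldl distStep ([], [], [], [])

-- ===== PRECONDITION & SPEC =====
-- Pre_ excludes exactly the strings with no newline, on which Python A raises IndexError.
def Pre_LDSParse (string : String) : Prop := '\n' ∈ string.toList
instance (string : String) : Decidable (Pre_LDSParse string) := by unfold Pre_LDSParse; infer_instance
def pvWitness_LDSParse : String := "ab12!x\n"

def Spec_LDSParse (string : String) (out : List String × List String × List String × List String) : Prop := out = LDSParse_alt string
instance (string : String) (out : List String × List String × List String × List String) : Decidable (Spec_LDSParse string out) := by unfold Spec_LDSParse; infer_instance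

-- ===== CLAIM (what is proved, stated in full; the proofs are below) =====
def Claim_equal_LDSParse : Prop := ∀ (string : String), Dom_LDSParse string → Pre_LDSParse string → Spec_LDSParse string (LDSParse string)

-- ===== LEMMAS AND PROOFS =====

lemma findNl_spec (cs : List Char) (i : Nat) :
    findNl cs i = i + ((cs.drop i).takeWhile (fun x => !(x == '\n'))).length := by
  fun_induction findNl cs i with
  | case1 i h hnl =>
      rw [List.drop_eq_getElem_cons h, List.takeWhile_cons, if_neg (by simp [hnl])]
      simp
  | case2 i h hnl ih =>
      rw [List.drop_eq_getElem_cons h, List.takeWhile_cons,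
        if_pos (by simpa using hnl), ih]
      simp
      omega
  | case3 i h =>
      have : cs.drop i = [] := List.drop_eq_nil_of_le (by omega)
      simp [this]

-- character-class facts (ASCII ranges are disjoint; none contains the newline)
lemma digit_not_lower (x : Char) (h : PySem.Chars.isdigit x = true) :
    PySem.Chars.islower x = false := by
  unfold PySem.Chars.isdigit at h
  unfold PySem.Chars.islower
  simp only [Bool.and_eq_true, decide_eq_true_eq, Char.le_def, UInt32.le_iff_toNat_le] at *
  simp only [Bool.and_eq_false_iff, decide_eq_false_iff_not, not_le, Char.le_def,
    UInt32.le_iff_toNat_le]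
  have h9 : '9'.val.toNat = 57 := by decide
  have ha : 'a'.val.toNat = 97 := by decide
  omega

lemma digit_not_upper (x : Char) (h : PySem.Chars.isdigit x = true) :
    PySem.Chars.isupper x = false := by
  unfold PySem.Chars.isdigit at h
  unfold PySem.Chars.isupper
  simp only [Bool.and_eq_true, decide_eq_true_eq, Char.le_def, UInt32.le_iff_toNat_le] at *
  simp only [Bool.and_eq_false_iff, decide_eq_false_iff_not, not_le, Char.le_def,
    UInt32.le_iff_toNat_le]
  have h9 : '9'.val.toNat = 57 := by decide
  have hA : 'A'.val.toNat = 65 := by decide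
  omega

lemma digit_ne_nl (x : Char) (h : PySem.Chars.isdigit x = true) : ¬ x = '\n' := by
  rintro rfl
  simp [PySem.Chars.isdigit, Char.le_def] at h

-- the category letter read back as A's class predicates
lemma catB_eq_D (x : Char) : (catB x == 'D') = PySem.Chars.isdigit x := by
  unfold catB
  split_ifs with h1 h2 <;> simp [h1]

lemma catB_eq_L (x : Char) :
    (catB x == 'L') = (PySem.Chars.islower x || PySem.Chars.isupper x) := by
  unfold catB
  split_ifs with h1 h2
  · simp [digit_not_lower x h1, digit_not_upper x h1]
  · simp [h2]
  · simp [h2]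

lemma catB_eq_S (x : Char) (hx : ¬ x = '\n') :
    (catB x == 'S') =
      !(PySem.Chars.isupper x || PySem.Chars.islower x || PySem.Chars.isdigit x || x == '\n') := by
  unfold catB
  split_ifs with h1 h2
  · simp [h1]
  · rcases Bool.or_eq_true_iff.mp h2 with h | h <;> simp [h]
  · simp only [Bool.or_eq_true, not_or, Bool.not_eq_true] at h2
    simp only [Bool.not_eq_true'] at h1
    simp [h1, h2.1, h2.2, hx]

-- generic takeWhile/dropWhile exchange for p implying q
lemma takeWhile_dropWhile_swap {α : Type} (p q : α → Bool)
    (hpq : ∀ x, p x = true → q x = true) (l : List α) :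
    (l.dropWhile p).takeWhile q = (l.takeWhile q).dropWhile p := by
  induction l with
  | nil => simp
  | cons x xs ih =>
      by_cases hp : p x
      · simp [List.dropWhile_cons, List.takeWhile_cons, hp, hpq x hp, ih]
      · by_cases hq : q x <;>
          simp [List.dropWhile_cons, List.takeWhile_cons, hp, hq]

lemma takeWhile_takeWhile_of_imp {α : Type} (p q : α → Bool)
    (hpq : ∀ x, p x = true → q x = true) (l : List α) :
    (l.takeWhile q).takeWhile p = l.takeWhile p := by
  induction l with
  | nil => simp
  | cons x xs ih =>
      by_cases hp : p x
      · simp [List.takeWhile_cons, hp, hpq x hp, ih]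
      · by_cases hq : q x <;> simp [List.takeWhile_cons, hp, hq]

lemma dropWhile_congr_mem {α : Type} (p q : α → Bool) (l : List α)
    (h : ∀ x ∈ l, p x = q x) : l.dropWhile p = l.dropWhile q := by
  induction l with
  | nil => rfl
  | cons x xs ih =>
      have hx := h x (by simp)
      by_cases hp : p x
      · simp [List.dropWhile_cons, hp, hx ▸ hp, ih fun y hy => h y (by simp [hy])]
      · have : q x = false := by rw [← hx]; simpa using hp
        simp [List.dropWhile_cons, hp, this]

lemma takeWhile_congr_mem {α : Type} (p q : α → Bool) (l : List α)
    (h : ∀ x ∈ l, p x = q x) : l.takeWhile p = l.takeWhile q := by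
  induction l with
  | nil => rfl
  | cons x xs ih =>
      have hx := h x (by simp)
      by_cases hp : p x
      · simp [List.takeWhile_cons, hp, hx ▸ hp, ih fun y hy => h y (by simp [hy])]
      · have : q x = false := by rw [← hx]; simpa using hp
        simp [List.takeWhile_cons, hp, this]

lemma drop_length_takeWhile {α : Type} (p : α → Bool) (l : List α) :
    l.drop (l.takeWhile p).length = l.dropWhile p := by
  set k := (l.takeWhile p).length with hk
  conv_lhs => rw [← List.takeWhile_append_dropWhile (p := p) (l := l)]
  rw [hk, List.drop_left]

lemma take_length_takeWhile {α : Type} (p : α → Bool) (l : List α) :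
    l.take (l.takeWhile p).length = l.takeWhile p := by
  set k := (l.takeWhile p).length with hk
  conv_lhs => rw [← List.takeWhile_append_dropWhile (p := p) (l := l)]
  rw [hk, List.take_left]

-- the left-to-right grouping of a (newline-free) prefix
def groups (xs : List Char) : List (Char × List Char) :=
  match xs with
  | [] => []
  | c :: rest =>
      (catB c, c :: rest.takeWhile (fun x => catB x == catB c)) ::
        groups (rest.dropWhile (fun x => catB x == catB c))
termination_by xs.length
decreasing_by
  have := List.length_dropWhile_le (fun x => catB x == catB c) rest
  simp
  omega

lemma groups_nil : groups [] = [] := by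
  rw [groups]

lemma groups_cons (c : Char) (rest : List Char) :
    groups (c :: rest) =
      (catB c, c :: rest.takeWhile (fun x => catB x == catB c)) ::
        groups (rest.dropWhile (fun x => catB x == catB c)) := by
  rw [groups]

lemma distStep_D (d l s t : List String) (run : List Char) :
    distStep (d, l, s, t) ('D', run) =
      (d ++ [String.ofList run], l, s,
        t ++ [String.ofList ('D' :: '.' :: PySem.Int.toChars (run.length : Int))]) := by
  simp [distStep]

lemma distStep_L (d l s t : List String) (run : List Char) :
    distStep (d, l, s, t) ('L', run) =
      (d, l ++ [String.ofList run], s,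
        t ++ [String.ofList ('L' :: '.' :: PySem.Int.toChars (run.length : Int))]) := by
  simp [distStep]

lemma distStep_S (d l s t : List String) (run : List Char) :
    distStep (d, l, s, t) ('S', run) =
      (d, l, s ++ [String.ofList run],
        t ++ [String.ofList ('S' :: '.' :: PySem.Int.toChars (run.length : Int))]) := by
  simp [distStep]

lemma foldl_runStep_head (xs : List Char) (a : Char × List Char) (acc : List (Char × List Char)) :
    List.foldl runStep (a :: acc) xs = List.foldl runStep [a] xs ++ acc := by
  induction xs generalizing a acc with
  | nil => simp
  | cons c rest ih =>
      obtain ⟨k', r⟩ := a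
      show List.foldl runStep (runStep ((k', r) :: acc) c) rest =
        List.foldl runStep (runStep [(k', r)] c) rest ++ acc
      by_cases hk : k' = catB c
      · simp only [runStep, beq_iff_eq, if_pos hk]
        exact ih _ _
      · simp only [runStep, beq_iff_eq, if_neg hk]
        rw [ih (catB c, [c]) ((k', r) :: acc), ih (catB c, [c]) [(k', r)]]
        simp

lemma foldl_runStep_single (xs : List Char) (k : Char) (r : List Char) :
    (List.foldl runStep [(k, r)] xs).reverse =
      (k, r ++ xs.takeWhile (fun x => catB x == k)) ::
        groups (xs.dropWhile (fun x => catB x == k)) := by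
  induction xs generalizing k r with
  | nil => simp [groups_nil]
  | cons c rest ih =>
      show (List.foldl runStep (runStep [(k, r)] c) rest).reverse = _
      by_cases hk : catB c = k
      · simp only [runStep, beq_iff_eq, if_pos (Eq.symm hk)]
        rw [ih k (r ++ [c]), List.takeWhile_cons, List.dropWhile_cons,
          if_pos (by simp [hk]), if_pos (by simp [hk])]
        simp [hk]
      · simp only [runStep, beq_iff_eq, if_neg (fun h => hk (Eq.symm h))]
        rw [foldl_runStep_head rest (catB c, [c]) [(k, r)], List.reverse_append,
          ih (catB c) [c], List.takeWhile_cons, List.dropWhile_cons,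
          if_neg (by simp [hk] : ¬ (catB c == k) = true),
          if_neg (by simp [hk] : ¬ (catB c == k) = true)]
        rw [groups_cons]
        simp

lemma groups_eq_rev (xs : List Char) :
    (List.foldl runStep [] xs).reverse = groups xs := by
  cases xs with
  | nil => simp [groups_nil]
  | cons c rest =>
      rw [List.foldl_cons, show runStep [] c = [(catB c, [c])] from rfl,
        foldl_runStep_single, groups_cons]
      simp

lemma loop_eq (cs : List Char) (n : Nat) (i : Nat) (d l s t : List String)
    (hn : cs.length - i ≤ n) (hmem : '\n' ∈ cs.drop i) :
    LDSParseLoop cs i d l s t =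
      (groups ((cs.drop i).takeWhile (fun x => !(x == '\n')))).foldl distStep (d, l, s, t) := by
  induction n generalizing i d l s t with
  | zero =>
      exfalso
      have : cs.drop i = [] := List.drop_eq_nil_of_le (by omega)
      simp [this] at hmem
  | succ n ih =>
      have hlt : i < cs.length := by
        by_contra h
        have : cs.drop i = [] := List.drop_eq_nil_of_le (by omega)
        simp [this] at hmem
      have hdrop : cs.drop i = cs[i] :: cs.drop (i + 1) := List.drop_eq_getElem_cons hlt
      rw [LDSParseLoop, dif_pos hlt]
      by_cases hnl : (cs[i] == '\n') = true
      · rw [dif_pos hnl]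
        conv_rhs => rw [hdrop, List.takeWhile_cons, if_neg (by simp [hnl])]
        rw [groups_nil]
        rfl
      · rw [dif_neg hnl]
        have hcnl : ¬ cs[i] = '\n' := by simpa using hnl
        by_cases hd : PySem.Chars.isdigit cs[i] = true
        · -- digit run
          rw [dif_pos hd]
          rw [pyRunWhile_spec]
          dsimp only
          simp only [List.nil_append]
          set p : Char → Bool := fun x => PySem.Chars.isdigit x with hpdef
          have hpi : p cs[i] = true := hd
          have himp : ∀ x, p x = true → (!(x == '\n')) = true := by
            intro x hx
            simpa using digit_ne_nl x hx
          have hlen1 : 0 < ((cs.drop i).takeWhile p).length := takeWhile_drop_pos p cs i hlt hpi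
          have hdd : cs.drop (i + ((cs.drop i).takeWhile p).length) = (cs.drop i).dropWhile p := by
            rw [← drop_length_takeWhile p (cs.drop i), List.drop_drop]
          have hmem' : '\n' ∈ (cs.drop i).dropWhile p := by
            have hsplit : '\n' ∈ (cs.drop i).takeWhile p ++ (cs.drop i).dropWhile p := by
              rw [List.takeWhile_append_dropWhile]
              exact hmem
            rcases List.mem_append.1 hsplit with h' | h'
            · have hx := himp _ (List.mem_takeWhile_imp h')
              simp at hx
            · exact h'
          rw [ih (i + ((cs.drop i).takeWhile p).length) _ _ _ _ (by omega)
            (by rw [hdd]; exact hmem')]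
          rw [hdd]
          -- unfold one group on the right
          conv_rhs => rw [hdrop, List.takeWhile_cons, if_pos (by simpa using hcnl)]
          rw [groups_cons]
          have hcat : catB cs[i] = 'D' := by
            unfold catB
            rw [if_pos hd]
          rw [hcat]
          have hpred : (fun x => catB x == 'D') = p := by
            funext x
            rw [hpdef, catB_eq_D x]
          rw [hpred]
          rw [takeWhile_takeWhile_of_imp p _ himp]
          rw [takeWhile_dropWhile_swap p _ himp]
          rw [List.foldl_cons, distStep_D]
          have hq : (!(cs[i] == '\n')) = true := by simpa using hcnl
          rw [hdrop]
          simp only [List.takeWhile_cons, List.dropWhile_cons, hpi, hq, if_true]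
        · rw [dif_neg hd]
          by_cases hl : (PySem.Chars.islower cs[i] || PySem.Chars.isupper cs[i]) = true
          · -- letter run
            rw [dif_pos hl]
            rw [pyRunWhile_spec]
            dsimp only
            simp only [List.nil_append]
            set p : Char → Bool := fun x => PySem.Chars.islower x || PySem.Chars.isupper x with hpdef
            have hpi : p cs[i] = true := hl
            have himp : ∀ x, p x = true → (!(x == '\n')) = true := by
              intro x hx
              cases hB : (x == '\n') with
              | false => simp [hB]
              | true =>
                  exfalso
                  have hxx : x = '\n' := by simpa using hB
                  rw [hpdef] at hx
                  subst hxx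
                  exact absurd hx (by decide)
            have hlen1 : 0 < ((cs.drop i).takeWhile p).length := takeWhile_drop_pos p cs i hlt hpi
            have hdd : cs.drop (i + ((cs.drop i).takeWhile p).length) = (cs.drop i).dropWhile p := by
              rw [← drop_length_takeWhile p (cs.drop i), List.drop_drop]
            have hmem' : '\n' ∈ (cs.drop i).dropWhile p := by
              have hsplit : '\n' ∈ (cs.drop i).takeWhile p ++ (cs.drop i).dropWhile p := by
                rw [List.takeWhile_append_dropWhile]
                exact hmem
              rcases List.mem_append.1 hsplit with h' | h'
              · have hx := himp _ (List.mem_takeWhile_imp h')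
                simp at hx
              · exact h'
            rw [ih (i + ((cs.drop i).takeWhile p).length) _ _ _ _ (by omega)
              (by rw [hdd]; exact hmem')]
            rw [hdd]
            -- unfold one group on the right
            conv_rhs => rw [hdrop, List.takeWhile_cons, if_pos (by simpa using hcnl)]
            rw [groups_cons]
            have hcat : catB cs[i] = 'L' := by
              unfold catB
              rw [if_neg (by simpa using hd), if_pos hl]
            rw [hcat]
            have hpred : (fun x => catB x == 'L') = p := by
              funext x
              rw [hpdef, catB_eq_L x]
            rw [hpred]
            rw [takeWhile_takeWhile_of_imp p _ himp]
            rw [takeWhile_dropWhile_swap p _ himp]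
            rw [List.foldl_cons, distStep_L]
            have hq : (!(cs[i] == '\n')) = true := by simpa using hcnl
            rw [hdrop]
            simp only [List.takeWhile_cons, List.dropWhile_cons, hpi, hq, if_true]
          · -- symbol run
            rw [dif_neg hl]
            rw [pyRunWhile_spec]
            dsimp only
            simp only [List.nil_append]
            set p : Char → Bool := fun x =>
              !(PySem.Chars.isupper x || PySem.Chars.islower x || PySem.Chars.isdigit x || x == '\n') with hpdef
            have hdf : PySem.Chars.isdigit cs[i] = false := by
              cases hcase : PySem.Chars.isdigit cs[i] with
              | false => rfl
              | true => exact absurd hcase hd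
            have hlf : PySem.Chars.islower cs[i] = false ∧ PySem.Chars.isupper cs[i] = false := by
              cases hlow : PySem.Chars.islower cs[i] with
              | true => exact absurd (by simp [hlow]) hl
              | false =>
                  cases hup : PySem.Chars.isupper cs[i] with
                  | true => exact absurd (by simp [hup]) hl
                  | false => exact ⟨rfl, rfl⟩
            have hnlf : (cs[i] == '\n') = false := by
              cases hcase : (cs[i] == '\n') with
              | false => rfl
              | true => exact absurd hcase hnl
            have hpi : p cs[i] = true := by
              simp only [hpdef]
              rw [hlf.1, hlf.2, hdf, hnlf]
              rfl
            have himp : ∀ x, p x = true → (!(x == '\n')) = true := by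
              intro x hx
              cases hB : (x == '\n') with
              | false => simp [hB]
              | true =>
                  exfalso
                  have hxx : x = '\n' := by simpa using hB
                  rw [hpdef] at hx
                  subst hxx
                  exact absurd hx (by decide)
            have hlen1 : 0 < ((cs.drop i).takeWhile p).length := takeWhile_drop_pos p cs i hlt hpi
            have hdd : cs.drop (i + ((cs.drop i).takeWhile p).length) = (cs.drop i).dropWhile p := by
              rw [← drop_length_takeWhile p (cs.drop i), List.drop_drop]
            have hmem' : '\n' ∈ (cs.drop i).dropWhile p := by
              have hsplit : '\n' ∈ (cs.drop i).takeWhile p ++ (cs.drop i).dropWhile p := by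
                rw [List.takeWhile_append_dropWhile]
                exact hmem
              rcases List.mem_append.1 hsplit with h' | h'
              · have hx := himp _ (List.mem_takeWhile_imp h')
                simp at hx
              · exact h'
            rw [ih (i + ((cs.drop i).takeWhile p).length) _ _ _ _ (by omega)
              (by rw [hdd]; exact hmem')]
            rw [hdd]
            -- unfold one group on the right
            conv_rhs => rw [hdrop, List.takeWhile_cons, if_pos (by simpa using hcnl)]
            rw [groups_cons]
            have hcat : catB cs[i] = 'S' := by
              unfold catB
              rw [if_neg (by simpa using hd), if_neg (by simpa using hl)]
            rw [hcat]
            have hmemq : ∀ x ∈ (cs.drop (i + 1)).takeWhile (fun x => !(x == '\n')), ¬ x = '\n' := by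
              intro x hx
              simpa using List.mem_takeWhile_imp hx
            rw [takeWhile_congr_mem (fun x => catB x == 'S') p
              ((cs.drop (i + 1)).takeWhile (fun x => !(x == '\n')))
              (fun x hx => by simpa only [hpdef] using catB_eq_S x (hmemq x hx))]
            rw [dropWhile_congr_mem (fun x => catB x == 'S') p
              ((cs.drop (i + 1)).takeWhile (fun x => !(x == '\n')))
              (fun x hx => by simpa only [hpdef] using catB_eq_S x (hmemq x hx))]
            rw [takeWhile_takeWhile_of_imp p _ himp]
            rw [takeWhile_dropWhile_swap p _ himp]
            rw [List.foldl_cons, distStep_S]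
            have hq : (!(cs[i] == '\n')) = true := by simpa using hcnl
            rw [hdrop]
            simp only [List.takeWhile_cons, List.dropWhile_cons, hpi, hq, if_true]

-- ===== VERDICT (by name: the statement is the Claim_ definition above) =====
theorem LDSParse_spec : Claim_equal_LDSParse := by
  intro string _ hPre
  unfold Spec_LDSParse LDSParse LDSParse_alt
  set cs := string.toList with hcs
  have hmem : '\n' ∈ cs.drop 0 := by simpa using hPre
  rw [loop_eq cs cs.length 0 [] [] [] [] (by omega) hmem]
  show _ = List.foldl distStep ([], [], [], [])
      ((List.foldl runStep []
        (PySem.List.slice cs none (some ((findNl cs 0 : Nat) : Int)))).reverse)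
  rw [findNl_spec]
  simp only [List.drop_zero, Nat.zero_add]
  rw [PySem.List.slice_to_natCast, take_length_takeWhile, groups_eq_rev]
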